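-- pv_equiv track=rewrite | github.com/HELPEN-Voice/neighbor | src/neighbor/regrid_adhoc.py | choose_most_complete_name
-- ===== SOURCE A (Python) =====
-- def choose_most_complete_name(name1: str, name2: str) -> str:
--     """
--     Choose the most complete version of a name (with middle name/initial).
--     Examples:
--         ("John Smith", "John H. Smith") -> "John H. Smith"
--         ("Jane Smith", "Jane Helen Smith") -> "Jane Helen Smith"
--     """
--     # Count meaningful parts (non-empty after stripping periods)
--     parts1 = [p for p in name1.split() if p.replace(".", "").strip()]
--     parts2 = [p for p in name2.split() if p.replace(".", "").strip()]
--
--     # Return the one with more parts (more complete)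
--     if len(parts2) > len(parts1):
--         return name2
--     elif len(parts1) > len(parts2):
--         return name1
--
--     # If same number of parts, prefer the one with longer middle part
--     # (full name over initial)
--     if len(parts1) >= 3 and len(parts2) >= 3:
--         middle1 = parts1[1].replace(".", "")
--         middle2 = parts2[1].replace(".", "")
--         if len(middle2) > len(middle1):
--             return name2
--
--     return name1  # Default to first if truly identical
-- ===== SOURCE B (Python) =====
-- def choose_most_complete_name(name1: str, name2: str) -> str:
--     # One character-level pass per name: count meaningful word-runs (runs of
--     # non-whitespace containing a non-period char) and record the non-period
--     # length of the second such run as it completes.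
--     def stats(name):
--         count = second = cur = 0
--         for ch in name + " ":
--             if ch.isspace():
--                 if cur > 0:
--                     count += 1
--                     if count == 2:
--                         second = cur
--                 cur = 0
--             elif ch != ".":
--                 cur += 1
--         return count, second
--
--     c1, s1 = stats(name1)
--     c2, s2 = stats(name2)
--     if c2 > c1:
--         return name2
--     if c1 > c2:
--         return name1
--     if c1 >= 3 and s2 > s1:
--         return name2
--     return name1
-- ===== Notes on version B (the rewrite author's own statement) =====
-- stated objective: alternative
-- what changed: Replaces A's staged string pipeline (split, filter, replace, strip, indexing) by a single character-level state machine per name that counts meaningful word-runs and the non-period length of the second run on the fly.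
import Mathlib
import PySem

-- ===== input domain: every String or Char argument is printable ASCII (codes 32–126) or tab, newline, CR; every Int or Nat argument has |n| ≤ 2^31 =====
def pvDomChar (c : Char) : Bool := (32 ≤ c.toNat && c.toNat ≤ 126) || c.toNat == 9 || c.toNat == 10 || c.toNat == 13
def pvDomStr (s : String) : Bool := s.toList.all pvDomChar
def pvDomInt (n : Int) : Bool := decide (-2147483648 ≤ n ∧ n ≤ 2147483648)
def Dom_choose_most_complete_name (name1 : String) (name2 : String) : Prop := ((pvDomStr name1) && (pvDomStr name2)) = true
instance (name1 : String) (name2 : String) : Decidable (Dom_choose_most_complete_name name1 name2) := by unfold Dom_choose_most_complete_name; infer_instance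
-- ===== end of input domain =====

-- B replaces A's staged string pipeline (split/filter/replace/strip/indexing) by a single
-- character-level state-machine pass per name; objective: alternative (same asymptotic cost).


-- ===== PORT A =====
def choose_most_complete_name (name1 : String) (name2 : String) : String :=
  let parts1 := (PySem.Str.split₀ name1).filter (fun p => PySem.Str.strip (PySem.Str.replace p "." "") != "")
  let parts2 := (PySem.Str.split₀ name2).filter (fun p => PySem.Str.strip (PySem.Str.replace p "." "") != "")
  if parts2.length > parts1.length then name2
  else if parts1.length > parts2.length then name1
  else if 3 ≤ parts1.length ∧ 3 ≤ parts2.length then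
    -- parts1[1] / parts2[1]: in range since both lengths are ≥ 3
    let middle1 := PySem.Str.replace (parts1.getD 1 "") "." ""
    let middle2 := PySem.Str.replace (parts2.getD 1 "") "." ""
    if PySem.Str.len middle2 > PySem.Str.len middle1 then name2 else name1
  else name1

-- ===== PORT B =====
-- one step of Source B's character loop; state = (count, second, cur)
def pvStep (st : Nat × Nat × Nat) (c : Char) : Nat × Nat × Nat :=
  if PySem.Chars.isspace c then
    if 0 < st.2.2 then (st.1 + 1, if st.1 + 1 = 2 then st.2.2 else st.2.1, 0)
    else (st.1, st.2.1, 0)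
  else if c = '.' then st
  else (st.1, st.2.1, st.2.2 + 1)

-- Source B's stats: fold the loop body over the characters of name + " "
def pvStats (name : String) : Nat × Nat :=
  let st := (name.toList ++ [' ']).foldl pvStep (0, 0, 0)
  (st.1, st.2.1)

def choose_most_complete_name_alt (name1 : String) (name2 : String) : String :=
  let st1 := pvStats name1
  let st2 := pvStats name2
  if st1.1 < st2.1 then name2
  else if st2.1 < st1.1 then name1
  else if 3 ≤ st1.1 ∧ st1.2 < st2.2 then name2
  else name1

-- ===== PRECONDITION & SPEC =====
def Spec_choose_most_complete_name (name1 : String) (name2 : String) (out : String) : Prop := out = choose_most_complete_name_alt name1 name2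
instance (name1 : String) (name2 : String) (out : String) : Decidable (Spec_choose_most_complete_name name1 name2 out) := by unfold Spec_choose_most_complete_name; infer_instance

-- ===== CLAIM (what is proved, stated in full; the proofs are below) =====
def Claim_equal_choose_most_complete_name : Prop := ∀ (name1 : String) (name2 : String), Dom_choose_most_complete_name name1 name2 → Spec_choose_most_complete_name name1 name2 (choose_most_complete_name name1 name2)

-- ===== LEMMAS AND PROOFS =====

-- number of non-period characters of a word
def pvMlen (p : List Char) : Nat := (p.filter (· ≠ '.')).length

-- meaningful words among the words split₀.go would produce from (cs, cur, [])
def pvM (cs cur : List Char) : List (List Char) :=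
  (PySem.Chars.split₀.go cs cur []).filter (fun p => decide (0 < pvMlen p))

-- reference recursion for (count, second) over a list of meaningful words
def pvBump : Nat → Nat → List (List Char) → Nat × Nat
  | count, second, [] => (count, second)
  | count, second, p :: ps =>
      pvBump (count + 1) (if count + 1 = 2 then pvMlen p else second) ps

theorem pvMlen_reverse (p : List Char) : pvMlen p.reverse = pvMlen p := by
  simp [pvMlen, List.filter_reverse]

theorem pvMlen_cons_dot (cur : List Char) : pvMlen ('.' :: cur) = pvMlen cur := by
  simp [pvMlen]

theorem pvMlen_cons_ne (c : Char) (cur : List Char) (hc : c ≠ '.') :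
    pvMlen (c :: cur) = pvMlen cur + 1 := by
  simp [pvMlen, hc]

theorem go_acc (cs : List Char) : ∀ (cur : List Char) (acc : List (List Char)),
    PySem.Chars.split₀.go cs cur acc = acc.reverse ++ PySem.Chars.split₀.go cs cur [] := by
  induction cs with
  | nil => intro cur acc; by_cases h : cur.isEmpty <;> simp [PySem.Chars.split₀.go, h]
  | cons c cs ih =>
    intro cur acc
    by_cases hs : PySem.Chars.isspace c
    · by_cases hc : cur.isEmpty
      · simp only [PySem.Chars.split₀.go, hs, hc, if_true]
        exact ih [] acc
      · simp only [PySem.Chars.split₀.go, hs, hc, if_true, if_false, Bool.false_eq_true]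
        rw [ih [] (cur.reverse :: acc), ih [] [cur.reverse]]
        simp
    · simp only [PySem.Chars.split₀.go, hs, if_false, Bool.false_eq_true]
      exact ih (c :: cur) acc

-- every character a word of split₀.go contains is a non-space character
theorem go_nospace (cs : List Char) : ∀ (cur : List Char) (acc : List (List Char)),
    (∀ c ∈ cur, PySem.Chars.isspace c = false) →
    (∀ p ∈ acc, ∀ c ∈ p, PySem.Chars.isspace c = false) →
    ∀ p ∈ PySem.Chars.split₀.go cs cur acc, ∀ c ∈ p, PySem.Chars.isspace c = false := by
  induction cs with
  | nil =>
    intro cur acc hcur hacc p hp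
    by_cases hc : cur.isEmpty
    · simp only [PySem.Chars.split₀.go, hc, if_true] at hp
      exact hacc p (by simpa using hp)
    · simp only [PySem.Chars.split₀.go, hc, if_false, Bool.false_eq_true, List.reverse_cons,
        List.mem_append, List.mem_reverse] at hp
      rcases hp with hp | hp
      · exact hacc p hp
      · intro c hc'
        simp only [List.mem_singleton] at hp
        subst hp
        exact hcur c (List.mem_reverse.mp hc')
  | cons d cs ih =>
    intro cur acc hcur hacc p hp
    by_cases hs : PySem.Chars.isspace d
    · by_cases hc : cur.isEmpty
      · simp only [PySem.Chars.split₀.go, hs, hc, if_true] at hp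
        exact ih [] acc (by simp) hacc p hp
      · simp only [PySem.Chars.split₀.go, hs, hc, if_true, if_false, Bool.false_eq_true] at hp
        refine ih [] (cur.reverse :: acc) (by simp) ?_ p hp
        intro q hq c hc'
        rcases List.mem_cons.mp hq with hq | hq
        · subst hq; exact hcur c (List.mem_reverse.mp hc')
        · exact hacc q hq c hc'
    · simp only [PySem.Chars.split₀.go, hs, if_false, Bool.false_eq_true] at hp
      refine ih (d :: cur) acc ?_ hacc p hp
      intro c hc'
      rcases List.mem_cons.mp hc' with h | h
      · subst h; exact Bool.eq_false_iff.mpr hs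
      · exact hcur c h

-- s.replace(".", "") removes exactly the periods
theorem replace_go_dot (fuel : Nat) : ∀ (l acc : List Char), l.length ≤ fuel →
    PySem.Chars.replace.go ['.'] [] fuel l acc = acc.reverse ++ l.filter (· ≠ '.') := by
  induction fuel with
  | zero =>
    intro l acc h
    have : l = [] := List.length_eq_zero_iff.mp (Nat.le_zero.mp h)
    subst this; simp [PySem.Chars.replace.go]
  | succ n ih =>
    intro l acc h
    cases l with
    | nil => simp [PySem.Chars.replace.go]
    | cons c t =>
      by_cases hc : c = '.'
      · subst hc
        have hpre : List.isPrefixOf ['.'] ('.' :: t) = true := by simp [List.isPrefixOf]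
        simp only [PySem.Chars.replace.go, hpre, if_true, List.length_cons, List.length_nil,
          List.drop_succ_cons, List.drop_zero, List.reverse_nil, List.nil_append]
        rw [ih t acc (by simpa using h)]
        simp
      · have hpre : List.isPrefixOf ['.'] (c :: t) = false := by
          simp only [List.isPrefixOf, Bool.and_true]
          exact beq_eq_false_iff_ne.mpr (fun hcontra => hc hcontra.symm)
        simp only [PySem.Chars.replace.go, hpre, if_false, Bool.false_eq_true]
        rw [ih t (c :: acc) (by simpa using h)]
        simp [hc]

theorem replace_dot (p : List Char) :
    PySem.Chars.replace p ['.'] [] = p.filter (· ≠ '.') := by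
  simp only [PySem.Chars.replace, List.isEmpty_cons, if_false, Bool.false_eq_true]
  simpa using replace_go_dot p.length p [] le_rfl

theorem dropWhile_all_false (f : Char → Bool) (l : List Char)
    (h : ∀ c ∈ l, f c = false) : l.dropWhile f = l := by
  cases l with
  | nil => rfl
  | cons c t => simp [List.dropWhile, h c (by simp)]

theorem strip_nospace (p : List Char) (h : ∀ c ∈ p, PySem.Chars.isspace c = false) :
    PySem.Chars.strip p = p := by
  unfold PySem.Chars.strip PySem.Chars.lstrip PySem.Chars.rstrip
  rw [dropWhile_all_false _ _ h, dropWhile_all_false _ _ (fun c hc => h c (List.mem_reverse.mp hc)),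
    List.reverse_reverse]

-- A's filter predicate, on a word without whitespace, is the meaningfulness test
theorem pred_char (p : List Char) (h : ∀ c ∈ p, PySem.Chars.isspace c = false) :
    ((PySem.Str.strip (PySem.Str.replace (String.ofList p) "." "") != "")) = decide (0 < pvMlen p) := by
  have h1 : PySem.Str.replace (String.ofList p) "." "" = String.ofList (p.filter (· ≠ '.')) := by
    simp [PySem.Str.replace, replace_dot]
  have h2 : PySem.Str.strip (String.ofList (p.filter (· ≠ '.'))) =
      String.ofList (p.filter (· ≠ '.')) := by
    simp [PySem.Str.strip, strip_nospace _ (fun c hc => h c (List.mem_of_mem_filter hc))]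
  rw [h1, h2]
  rcases eq_or_ne (p.filter (· ≠ '.')) [] with he | he
  · have hz : pvMlen p = 0 := by simp only [pvMlen, he, List.length_nil]
    rw [he, hz]
    decide
  · have hlen : 0 < pvMlen p := by
      simp only [pvMlen]
      exact List.length_pos_of_ne_nil he
    have hne : String.ofList (p.filter (· ≠ '.')) ≠ "" := by
      intro hcontra
      apply he
      have := congrArg String.toList hcontra
      simpa using this
    rw [bne_iff_ne.mpr hne, decide_eq_true hlen]

theorem pvBump_ge2 (M : List (List Char)) : ∀ (count second : Nat), 2 ≤ count →
    pvBump count second M = (count + M.length, second) := by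
  induction M with
  | nil => intro count second _; simp [pvBump]
  | cons p ps ih =>
    intro count second h
    have : count + 1 ≠ 2 := by omega
    simp only [pvBump, this, if_false]
    rw [ih (count + 1) second (by omega)]
    simp; omega

theorem pvBump_zero (M : List (List Char)) :
    pvBump 0 0 M = (M.length, if 2 ≤ M.length then pvMlen (M.getD 1 []) else 0) := by
  match M with
  | [] => simp [pvBump]
  | [p] => simp [pvBump]
  | p :: q :: ps =>
    show pvBump 1 0 (q :: ps) = _
    show pvBump 2 (pvMlen q) ps = _
    rw [pvBump_ge2 ps 2 (pvMlen q) le_rfl]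
    simp; omega

-- main loop invariant: the fold over (cs ++ [' ']) computes pvBump over the meaningful words
theorem fold_main (cs : List Char) : ∀ (cur : List Char) (count second : Nat),
    (∀ c ∈ cur, PySem.Chars.isspace c = false) →
    List.foldl pvStep (count, second, pvMlen cur) (cs ++ [' ']) =
      ((pvBump count second (pvM cs cur)).1, (pvBump count second (pvM cs cur)).2, 0) := by
  induction cs with
  | nil =>
    intro cur count second _
    have hsp : PySem.Chars.isspace ' ' = true := by decide
    simp only [List.nil_append, List.foldl_cons, List.foldl_nil]
    by_cases hm : 0 < pvMlen cur
    · have hcur : cur.isEmpty = false := by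
        rcases cur with _ | _
        · simp [pvMlen] at hm
        · simp
      simp only [pvM, PySem.Chars.split₀.go, hcur, if_false, Bool.false_eq_true,
        List.reverse_cons, List.reverse_nil, List.nil_append]
      have : (0 < pvMlen cur.reverse) := by rwa [pvMlen_reverse]
      simp only [List.filter_cons, this, decide_true, List.filter_nil]
      simp [pvStep, hsp, hm, pvBump, pvMlen_reverse]
    · have hz : pvMlen cur = 0 := by omega
      have : pvM [] cur = [] := by
        by_cases hcur : cur.isEmpty
        · simp [pvM, PySem.Chars.split₀.go, hcur]
        · simp only [pvM, PySem.Chars.split₀.go, hcur, if_false, Bool.false_eq_true,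
            List.reverse_cons, List.reverse_nil, List.nil_append]
          have : ¬ (0 < pvMlen cur.reverse) := by rw [pvMlen_reverse]; omega
          simp [this]
      rw [this]
      simp [pvStep, hsp, hz, pvBump]
  | cons c cs ih =>
    intro cur count second hcur
    simp only [List.cons_append, List.foldl_cons]
    by_cases hs : PySem.Chars.isspace c
    · by_cases hm : 0 < pvMlen cur
      · have hcure : cur.isEmpty = false := by
          rcases cur with _ | _
          · simp [pvMlen] at hm
          · simp
        have hstep : pvStep (count, second, pvMlen cur) c =
            (count + 1, if count + 1 = 2 then pvMlen cur else second, 0) := by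
          simp [pvStep, hs, hm]
        rw [hstep]
        have := ih [] (count + 1) (if count + 1 = 2 then pvMlen cur else second) (by simp)
        rw [show pvMlen [] = 0 from rfl] at this
        rw [this]
        have hMsplit : pvM (c :: cs) cur = cur.reverse :: pvM cs [] := by
          simp only [pvM, PySem.Chars.split₀.go, hs, hcure, if_true, if_false,
            Bool.false_eq_true]
          rw [go_acc cs [] [cur.reverse]]
          have : (0 < pvMlen cur.reverse) := by rwa [pvMlen_reverse]
          simp [this]
        rw [hMsplit]
        simp [pvBump, pvMlen_reverse]
      · have hz : pvMlen cur = 0 := by omega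
        have hstep : pvStep (count, second, pvMlen cur) c = (count, second, 0) := by
          simp [pvStep, hs, hz]
        rw [hstep]
        have := ih [] count second (by simp)
        rw [show pvMlen [] = 0 from rfl] at this
        rw [this]
        have hMsplit : pvM (c :: cs) cur = pvM cs [] := by
          by_cases hcure : cur.isEmpty
          · simp [pvM, PySem.Chars.split₀.go, hs, hcure]
          · simp only [pvM, PySem.Chars.split₀.go, hs, hcure, if_true, if_false,
              Bool.false_eq_true]
            rw [go_acc cs [] [cur.reverse]]
            have : ¬ (0 < pvMlen cur.reverse) := by rw [pvMlen_reverse]; omega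
            simp [this]
        rw [hMsplit]
    · have hM : pvM (c :: cs) cur = pvM cs (c :: cur) := by
        simp [pvM, PySem.Chars.split₀.go, hs]
      have hcur' : ∀ d ∈ (c :: cur), PySem.Chars.isspace d = false := by
        intro d hd
        rcases List.mem_cons.mp hd with h | h
        · subst h; simpa using hs
        · exact hcur d h
      by_cases hc : c = '.'
      · have hstep : pvStep (count, second, pvMlen cur) c = (count, second, pvMlen (c :: cur)) := by
          subst hc; simp [pvStep, hs, pvMlen_cons_dot]
        rw [hstep, ih (c :: cur) count second hcur', hM]
      · have hstep : pvStep (count, second, pvMlen cur) c = (count, second, pvMlen (c :: cur)) := by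
          simp [pvStep, hs, hc, pvMlen_cons_ne c cur hc]
        rw [hstep, ih (c :: cur) count second hcur', hM]

-- pvStats in terms of the meaningful words of the whole string
theorem pvStats_eq (s : String) :
    pvStats s = ((pvM s.toList []).length,
      if 2 ≤ (pvM s.toList []).length then pvMlen ((pvM s.toList []).getD 1 []) else 0) := by
  have := fold_main s.toList [] 0 0 (by simp)
  rw [show pvMlen [] = 0 from rfl] at this
  simp only [pvStats]
  rw [this, pvBump_zero]

-- A's filtered parts are the meaningful words, mapped to strings
theorem partsA_eq (s : String) :
    ((PySem.Str.split₀ s).filter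
        (fun p => PySem.Str.strip (PySem.Str.replace p "." "") != "")) =
      (pvM s.toList []).map String.ofList := by
  have hns : ∀ p ∈ PySem.Chars.split₀ s.toList, ∀ c ∈ p, PySem.Chars.isspace c = false :=
    go_nospace s.toList [] [] (by simp) (by simp)
  simp only [PySem.Str.split₀, PySem.Chars.split₀, pvM]
  rw [List.filter_map]
  refine congrArg (List.map String.ofList) (List.filter_congr ?_)
  intro p hp
  simp only [Function.comp_apply]
  rw [pred_char p (hns p hp)]

-- the middle length A compares is the Int cast of pvMlen
theorem middle_len (q : List Char) :
    PySem.Str.len (PySem.Str.replace (String.ofList q) "." "") = (pvMlen q : Int) := by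
  simp [PySem.Str.len, PySem.Str.replace, replace_dot, pvMlen]

-- ===== VERDICT (by name: the statement is the Claim_ definition above) =====
theorem choose_most_complete_name_spec : Claim_equal_choose_most_complete_name := by
  intro name1 name2 _
  show choose_most_complete_name name1 name2 = choose_most_complete_name_alt name1 name2
  simp only [choose_most_complete_name, choose_most_complete_name_alt, partsA_eq,
    pvStats_eq]
  set M1 := pvM name1.toList [] with hM1
  set M2 := pvM name2.toList [] with hM2
  simp only [List.length_map]
  by_cases h12 : M1.length < M2.length
  · simp [h12]
  · by_cases h21 : M2.length < M1.length
    · simp [h21, Nat.not_lt.mpr (Nat.le_of_lt h21)]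
    · have heq : M1.length = M2.length := by omega
      simp only [h12, h21, if_false]
      by_cases h3 : 3 ≤ M1.length
      · have h3' : 3 ≤ M2.length := by omega
        have hg1 : (M1.map String.ofList).getD 1 "" = String.ofList (M1.getD 1 []) := by
          rw [List.getD_eq_getElem _ _ (by simp; omega), List.getD_eq_getElem _ _ (by omega)]
          simp
        have hg2 : (M2.map String.ofList).getD 1 "" = String.ofList (M2.getD 1 []) := by
          rw [List.getD_eq_getElem _ _ (by simp; omega), List.getD_eq_getElem _ _ (by omega)]
          simp
        simp only [h3, h3', and_true, true_and, if_true, hg1, hg2, middle_len,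
          (by omega : 2 ≤ M1.length), (by omega : 2 ≤ M2.length)]
        by_cases hlt : pvMlen (M1[1]?.getD []) < pvMlen (M2[1]?.getD [])
        · simp [hlt, List.getD]
        · have hilt : ¬ ((pvMlen (M1[1]?.getD []) : Int) < (pvMlen (M2[1]?.getD []) : Int)) := by
            exact_mod_cast hlt
          simp [hlt, hilt, List.getD]
      · have h3' : ¬ 3 ≤ M2.length := by omega
        simp [h3, h3']
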